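-- pv_equiv track=rewrite | github.com/edersonbrilhante/pyhappn | pyhappn/utils.py | generate_gmail
-- ===== SOURCE A (Python) =====
-- def generate_gmail(email):
--     if len(email) <= 1:
--         yield email
--     else:
--         head, tail = email[0], email[1:]
--         for item in generate_gmail(tail):
--             yield head + item
--             yield head + '.' + item
-- ===== SOURCE B (Python) =====
-- def generate_gmail(email):
--     if len(email) <= 1:
--         yield email
--     else:
--         for mask in range(2 ** (len(email) - 1)):
--             parts = []
--             m = mask
--             for ch in email:
--                 parts.append(ch)
--                 if m & 1:
--                     parts.append('.')
--                 m >>= 1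
--             yield ''.join(parts)
-- ===== Notes on version B (the rewrite author's own statement) =====
-- stated objective: alternative
-- what changed: Replaces the recursive generator (recursing on the tail and doubling the stream per character) with a flat loop over bitmasks 0..2^(n-1)-1, building each variant in one pass by inserting a dot at every set bit position.
import Mathlib
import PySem

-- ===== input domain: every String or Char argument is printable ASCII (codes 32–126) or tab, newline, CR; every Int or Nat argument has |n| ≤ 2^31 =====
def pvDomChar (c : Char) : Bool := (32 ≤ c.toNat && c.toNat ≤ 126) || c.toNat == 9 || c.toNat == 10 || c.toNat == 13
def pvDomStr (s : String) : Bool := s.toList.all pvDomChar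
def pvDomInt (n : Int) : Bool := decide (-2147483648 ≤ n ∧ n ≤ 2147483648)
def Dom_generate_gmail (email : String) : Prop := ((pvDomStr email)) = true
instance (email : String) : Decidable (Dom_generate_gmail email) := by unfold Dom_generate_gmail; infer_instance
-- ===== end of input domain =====

-- B replaces A's recursive generator by a flat loop over bitmasks (alternative decomposition, same cost).

-- ===== PORT A =====
-- A recurses on the string: head/tail split, and for each variant of the tail
-- yields head+item and head+'.'+item.  Ported as structural recursion on the char list.
def genAuxA : List Char → List (List Char)
  | [] => [[]]                 -- len(email) <= 1: yield email
  | [c] => [[c]]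
  | c :: d :: rest =>
      (genAuxA (d :: rest)).flatMap (fun item => [c :: item, c :: '.' :: item])

def generate_gmail (email : String) : List String :=
  (genAuxA email.toList).map String.ofList

-- ===== PORT B =====
-- inner loop of Source B: state (parts, m); append ch, append '.' if m is odd, halve m
def buildB (l : List Char) (mask : Nat) : List Char :=
  (l.foldl (fun (st : List Char × Nat) ch =>
      ((if st.2 % 2 = 1 then st.1 ++ [ch] ++ ['.'] else st.1 ++ [ch]), st.2 / 2))
    (([] : List Char), mask)).1

def generate_gmail_alt (email : String) : List String :=
  let l := email.toList
  if l.length ≤ 1 then [email]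
  else (List.range (2 ^ (l.length - 1))).map (fun mask => String.ofList (buildB l mask))

-- ===== PRECONDITION & SPEC =====
def Spec_generate_gmail (email : String) (out : List String) : Prop := out = generate_gmail_alt email
instance (email : String) (out : List String) : Decidable (Spec_generate_gmail email out) := by unfold Spec_generate_gmail; infer_instance

-- ===== CLAIM (what is proved, stated in full; the proofs are below) =====
def Claim_equal_generate_gmail : Prop := ∀ (email : String), Dom_generate_gmail email → Spec_generate_gmail email (generate_gmail email)

-- ===== LEMMAS AND PROOFS =====

-- proof-side recursive characterisation of B's one-pass builder
def bld : List Char → Nat → List Char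
  | [], _ => []
  | c :: rest, m =>
      if m % 2 = 1 then c :: '.' :: bld rest (m / 2) else c :: bld rest (m / 2)

theorem buildB_fold (l : List Char) (acc : List Char) (m : Nat) :
    (l.foldl (fun (st : List Char × Nat) ch =>
      ((if st.2 % 2 = 1 then st.1 ++ [ch] ++ ['.'] else st.1 ++ [ch]), st.2 / 2))
      (acc, m)).1 = acc ++ bld l m := by
  induction l generalizing acc m with
  | nil => simp [bld]
  | cons c rest ih =>
      by_cases h : m % 2 = 1
      · simp only [List.foldl_cons, if_pos h, bld]
        rw [ih]; simp
      · simp only [List.foldl_cons, if_neg h, bld]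
        rw [ih]; simp

theorem buildB_eq_bld (l : List Char) (m : Nat) : buildB l m = bld l m := by
  simpa [buildB] using buildB_fold l [] m

theorem range_double (n : Nat) (f : Nat → List Char) :
    (List.range (2 * n)).map f
      = (List.range n).flatMap (fun t => [f (2 * t), f (2 * t + 1)]) := by
  induction n with
  | zero => simp
  | succ k ih =>
      have h2 : 2 * (k + 1) = (2 * k) + 1 + 1 := by omega
      rw [h2, List.range_succ, List.range_succ, List.range_succ]
      simp [ih]

theorem bld_even (c : Char) (rest : List Char) (t : Nat) :
    bld (c :: rest) (2 * t) = c :: bld rest t := by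
  have h : (2 * t) % 2 = 0 := by omega
  have h2 : (2 * t) / 2 = t := by omega
  simp [bld, h, h2]

theorem bld_odd (c : Char) (rest : List Char) (t : Nat) :
    bld (c :: rest) (2 * t + 1) = c :: '.' :: bld rest t := by
  have h : (2 * t + 1) % 2 = 1 := by omega
  have h2 : (2 * t + 1) / 2 = t := by omega
  simp [bld, h, h2]

theorem genAuxA_eq_map (l : List Char) (hne : l ≠ []) :
    genAuxA l = (List.range (2 ^ (l.length - 1))).map (bld l) := by
  induction l with
  | nil => exact absurd rfl hne
  | cons c rest ih =>
      cases rest with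
      | nil => simp [genAuxA, bld]
      | cons d rest' =>
          rw [genAuxA, ih (by simp)]
          have hlen : (c :: d :: rest').length - 1 = ((d :: rest').length - 1) + 1 := by
            simp
          rw [hlen, pow_succ, Nat.mul_comm, range_double]
          rw [List.flatMap_map]
          simp only [bld_even, bld_odd]

-- ===== VERDICT (by name: the statement is the Claim_ definition above) =====
theorem generate_gmail_spec : Claim_equal_generate_gmail := by
  intro email _
  unfold Spec_generate_gmail generate_gmail generate_gmail_alt
  cases hl : email.toList with
  | nil =>
      have he : String.ofList [] = email := by rw [← hl]; exact String.ofList_toList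
      rw [← he]; simp [genAuxA]
  | cons c rest =>
      cases rest with
      | nil =>
          have he : String.ofList [c] = email := by rw [← hl]; exact String.ofList_toList
          rw [← he]; simp [genAuxA]
      | cons d rest' =>
          rw [genAuxA_eq_map _ (by simp)]
          simp [Function.comp, buildB_eq_bld]
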